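-- pv_equiv track=rewrite | github.com/DragunWF/Competitive-Programming | CodeWars/python/5_kyu/convert_all_the_cases.py | convert_camel_to_other_case
-- ===== SOURCE A (Python) =====
-- def convert_camel_to_other_case(s: str, is_snake: bool) -> str:
--     words = []
--     word = ""
--     for char in s:
--         if char.isupper():
--             words.append(word)
--             word = ""
--         word += char.lower()
--     words.append(word)
--     return ("_" if is_snake else "-").join(words)
-- ===== SOURCE B (Python) =====
-- def convert_camel_to_other_case(s: str, is_snake: bool) -> str:
--     sep = "_" if is_snake else "-"
--     return "".join((sep if c.isupper() else "") + c.lower() for c in s)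
-- ===== Notes on version B (the rewrite author's own statement) =====
-- stated objective: simpler
-- what changed: Replaces the word-list/word-buffer accumulation and final join by a single character-substitution pass that emits the separator before each uppercase letter and lowercases every character.
import Mathlib
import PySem

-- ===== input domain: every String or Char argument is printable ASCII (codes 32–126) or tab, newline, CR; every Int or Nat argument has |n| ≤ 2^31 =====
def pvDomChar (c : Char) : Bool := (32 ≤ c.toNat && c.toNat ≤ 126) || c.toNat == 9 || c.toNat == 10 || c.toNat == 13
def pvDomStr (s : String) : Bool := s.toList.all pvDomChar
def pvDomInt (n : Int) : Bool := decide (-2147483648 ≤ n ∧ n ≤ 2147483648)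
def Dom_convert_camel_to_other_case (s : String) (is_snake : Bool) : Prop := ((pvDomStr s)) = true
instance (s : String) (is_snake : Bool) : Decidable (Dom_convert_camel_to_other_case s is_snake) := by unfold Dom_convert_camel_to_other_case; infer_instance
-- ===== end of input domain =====

-- B replaces A's word-list/word-buffer accumulation and final join by a single
-- character-substitution pass (simpler decomposition, same O(n) cost).

-- ===== PORT A =====
-- A's loop state: (words, word); on an uppercase char the current word is flushed;
-- every char is appended lowercased; finally the last word is appended and all joined.
def convert_camel_to_other_case (s : String) (is_snake : Bool) : String :=
  let st := s.toList.foldl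
    (fun (acc : List (List Char) × List Char) c =>
      let acc := if PySem.Chars.isupper c then (acc.1 ++ [acc.2], []) else acc
      (acc.1, acc.2 ++ [PySem.Chars.lowerChar c]))
    ([], [])
  String.ofList (PySem.Chars.join (if is_snake then ['_'] else ['-']) (st.1 ++ [st.2]))

-- ===== PORT B =====
-- B: emit sep before each uppercase char, lowercase every char, in one pass.
def convert_camel_to_other_case_alt (s : String) (is_snake : Bool) : String :=
  let sep : Char := if is_snake then '_' else '-'
  String.ofList (s.toList.flatMap
    (fun c => (if PySem.Chars.isupper c then [sep] else []) ++ [PySem.Chars.lowerChar c]))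

-- ===== PRECONDITION & SPEC =====
def Spec_convert_camel_to_other_case (s : String) (is_snake : Bool) (out : String) : Prop := out = convert_camel_to_other_case_alt s is_snake
instance (s : String) (is_snake : Bool) (out : String) : Decidable (Spec_convert_camel_to_other_case s is_snake out) := by unfold Spec_convert_camel_to_other_case; infer_instance

-- ===== CLAIM (what is proved, stated in full; the proofs are below) =====
def Claim_equal_convert_camel_to_other_case : Prop := ∀ (s : String) (is_snake : Bool), Dom_convert_camel_to_other_case s is_snake → Spec_convert_camel_to_other_case s is_snake (convert_camel_to_other_case s is_snake)

-- ===== LEMMAS AND PROOFS =====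

-- extending the LAST word of a nonempty word list extends the join
theorem join_append_last (sep y z : List Char) (xs : List (List Char)) :
    PySem.Chars.join sep (xs ++ [y ++ z]) = PySem.Chars.join sep (xs ++ [y]) ++ z := by
  induction xs with
  | nil => simp [PySem.Chars.join_singleton]
  | cons x t ih =>
    cases t with
    | nil =>
      simp [PySem.Chars.join_cons_cons, PySem.Chars.join_singleton, List.append_assoc]
    | cons a b =>
      simp only [List.cons_append, PySem.Chars.join_cons_cons] at ih ⊢
      simp [ih, List.append_assoc]

-- appending a fresh word to a nonempty word list appends sep ++ word to the join
theorem join_append_word (sep w : List Char) (xs : List (List Char)) (y : List Char) :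
    PySem.Chars.join sep ((xs ++ [y]) ++ [w]) =
      PySem.Chars.join sep (xs ++ [y]) ++ sep ++ w := by
  induction xs with
  | nil => simp [PySem.Chars.join_cons_cons, PySem.Chars.join_singleton, List.append_assoc]
  | cons x t ih =>
    cases t with
    | nil =>
      simp [PySem.Chars.join_cons_cons, PySem.Chars.join_singleton, List.append_assoc]
    | cons a b =>
      simp only [List.cons_append, PySem.Chars.join_cons_cons] at ih ⊢
      rw [ih]
      simp [List.append_assoc]

-- the loop invariant relating A's fold to B's flatMap
theorem fold_join (sep : List Char) (l : List Char) :
    ∀ (words : List (List Char)) (word : List Char),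
    (let st := l.foldl
        (fun (acc : List (List Char) × List Char) c =>
          let acc := if PySem.Chars.isupper c then (acc.1 ++ [acc.2], []) else acc
          (acc.1, acc.2 ++ [PySem.Chars.lowerChar c]))
        (words, word)
     PySem.Chars.join sep (st.1 ++ [st.2])) =
    PySem.Chars.join sep (words ++ [word]) ++
      l.flatMap (fun c => (if PySem.Chars.isupper c then sep else []) ++ [PySem.Chars.lowerChar c]) := by
  induction l with
  | nil => intro words word; simp
  | cons c t ih =>
    intro words word
    by_cases h : PySem.Chars.isupper c = true
    · simp only [List.foldl_cons, List.flatMap_cons, h, if_pos]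
      rw [ih]
      simp only [List.nil_append]
      rw [join_append_word sep [PySem.Chars.lowerChar c] words word]
      simp
    · simp only [List.foldl_cons, List.flatMap_cons, h, if_neg, Bool.not_eq_true] at *
      rw [ih]
      rw [join_append_last sep word [PySem.Chars.lowerChar c] words]
      simp

-- ===== VERDICT (by name: the statement is the Claim_ definition above) =====
theorem convert_camel_to_other_case_spec : Claim_equal_convert_camel_to_other_case := by
  intro s is_snake _
  unfold Spec_convert_camel_to_other_case convert_camel_to_other_case convert_camel_to_other_case_alt
  have h := fold_join (if is_snake then ['_'] else ['-']) s.toList [] []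
  simp only [] at h ⊢
  rw [h]
  simp only [List.nil_append, PySem.Chars.join_singleton]
  congr 1
  apply List.flatMap_congr
  intro c _
  cases is_snake <;> by_cases hc : PySem.Chars.isupper c = true <;> simp [hc]
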